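-- pv_equiv track=rewrite | github.com/JohnTaylor81/ComfyUI-Johns | Node/Backend/TiledSamplerBackend.py | GetTraversalOrder
-- ===== SOURCE A (Python) =====
-- def GetTraversalOrder(cols: int, rows: int, mode: str):
-- 	mode  = (mode or "").strip()
-- 	order = []
--
-- 	if mode == "Horizontal Serpentine":
-- 		for r in range(rows):
-- 			if r % 2 == 0:
-- 				for c in range(cols):
-- 					order.append((r, c))
-- 			else:
-- 				for c in range(cols - 1, -1, -1):
-- 					order.append((r, c))
--
-- 	elif mode == "Vertical Serpentine":
-- 		for c in range(cols):
-- 			if c % 2 == 0: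
-- 				for r in range(rows):
-- 					order.append((r, c))
-- 			else:
-- 				for r in range(rows - 1, -1, -1):
-- 					order.append((r, c))
--
-- 	elif mode == "Row-Major":
-- 		for r in range(rows):
-- 			for c in range(cols):
-- 				order.append((r, c))
--
-- 	elif mode == "Column-Major":
-- 		for c in range(cols):
-- 			for r in range(rows):
-- 				order.append((r, c))
--
-- 	else:
-- 		for r in range(rows):
-- 			for c in range(cols):
-- 				order.append((r, c))
--
-- 	return order
-- ===== SOURCE B (Python) =====
-- def GetTraversalOrder(cols: int, rows: int, mode: str):
-- 	mode = (mode or "").strip()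
-- 	R = rows if rows > 0 else 0
-- 	C = cols if cols > 0 else 0
--
-- 	if mode == "Horizontal Serpentine":
-- 		def cell(i):
-- 			r, off = divmod(i, C)
-- 			return (r, off if r % 2 == 0 else C - 1 - off)
-- 	elif mode == "Vertical Serpentine":
-- 		def cell(i):
-- 			c, off = divmod(i, R)
-- 			return (off if c % 2 == 0 else R - 1 - off, c)
-- 	elif mode == "Column-Major":
-- 		def cell(i):
-- 			return (i % R, i // R)
-- 	else:
-- 		def cell(i):
-- 			return (i // C, i % C)
--
-- 	return [cell(i) for i in range(R * C)]
-- ===== Notes on version B (the rewrite author's own statement) =====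
-- stated objective: alternative
-- what changed: Replaces each mode's nested row/column loops with direction branches by a single flat pass over range(R*C) that decodes the linear index into (r,c) arithmetically (divmod), expressing serpentine reversal as off vs C-1-off instead of a backward inner loop.
import Mathlib
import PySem

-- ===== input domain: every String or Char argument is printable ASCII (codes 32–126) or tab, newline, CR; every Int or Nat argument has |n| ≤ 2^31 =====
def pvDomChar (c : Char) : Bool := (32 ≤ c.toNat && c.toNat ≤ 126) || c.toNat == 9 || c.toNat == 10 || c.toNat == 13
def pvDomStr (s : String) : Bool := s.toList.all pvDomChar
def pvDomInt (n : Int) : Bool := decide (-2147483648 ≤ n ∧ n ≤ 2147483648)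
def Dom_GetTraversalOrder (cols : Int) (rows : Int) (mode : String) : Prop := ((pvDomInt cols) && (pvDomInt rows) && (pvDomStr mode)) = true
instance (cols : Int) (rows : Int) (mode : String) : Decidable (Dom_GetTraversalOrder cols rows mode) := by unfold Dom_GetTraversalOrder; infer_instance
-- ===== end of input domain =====

-- B replaces the nested direction-branching loops by one flat pass decoding a linear index via divmod (alternative decomposition, same cost).

-- ===== PORT A =====
def GetTraversalOrder (cols : Int) (rows : Int) (mode : String) : List (Int × Int) :=
  let m := PySem.Str.strip mode   -- `(mode or "").strip()`: strip of "" is "", so `or ""` is a no-op here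
  if m == "Horizontal Serpentine" then
    (PySem.List.pyRange 0 rows 1).foldl (fun order r =>
      if PySem.Int.mod r 2 == 0 then
        (PySem.List.pyRange 0 cols 1).foldl (fun o c => o ++ [(r, c)]) order
      else
        (PySem.List.pyRange (cols - 1) (-1) (-1)).foldl (fun o c => o ++ [(r, c)]) order) []
  else if m == "Vertical Serpentine" then
    (PySem.List.pyRange 0 cols 1).foldl (fun order c =>
      if PySem.Int.mod c 2 == 0 then
        (PySem.List.pyRange 0 rows 1).foldl (fun o r => o ++ [(r, c)]) order
      else
        (PySem.List.pyRange (rows - 1) (-1) (-1)).foldl (fun o r => o ++ [(r, c)]) order) []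
  else if m == "Row-Major" then
    (PySem.List.pyRange 0 rows 1).foldl (fun order r =>
      (PySem.List.pyRange 0 cols 1).foldl (fun o c => o ++ [(r, c)]) order) []
  else if m == "Column-Major" then
    (PySem.List.pyRange 0 cols 1).foldl (fun order c =>
      (PySem.List.pyRange 0 rows 1).foldl (fun o r => o ++ [(r, c)]) order) []
  else
    (PySem.List.pyRange 0 rows 1).foldl (fun order r =>
      (PySem.List.pyRange 0 cols 1).foldl (fun o c => o ++ [(r, c)]) order) []

-- ===== PORT B =====
def GetTraversalOrder_alt (cols : Int) (rows : Int) (mode : String) : List (Int × Int) :=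
  let m := PySem.Str.strip mode
  let R : Int := if rows > 0 then rows else 0
  let C : Int := if cols > 0 then cols else 0
  let cell : Int → Int × Int :=
    if m == "Horizontal Serpentine" then
      fun i =>
        let r := PySem.Int.floordiv i C
        let off := PySem.Int.mod i C
        (r, if PySem.Int.mod r 2 == 0 then off else C - 1 - off)
    else if m == "Vertical Serpentine" then
      fun i =>
        let c := PySem.Int.floordiv i R
        let off := PySem.Int.mod i R
        ((if PySem.Int.mod c 2 == 0 then off else R - 1 - off), c)
    else if m == "Column-Major" then
      fun i => (PySem.Int.mod i R, PySem.Int.floordiv i R)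
    else
      fun i => (PySem.Int.floordiv i C, PySem.Int.mod i C)
  (PySem.List.pyRange 0 (R * C) 1).map cell

-- ===== PRECONDITION & SPEC =====
def Spec_GetTraversalOrder (cols : Int) (rows : Int) (mode : String) (out : List (Int × Int)) : Prop := out = GetTraversalOrder_alt cols rows mode
instance (cols : Int) (rows : Int) (mode : String) (out : List (Int × Int)) : Decidable (Spec_GetTraversalOrder cols rows mode out) := by unfold Spec_GetTraversalOrder; infer_instance

-- ===== CLAIM (what is proved, stated in full; the proofs are below) =====
def Claim_equal_GetTraversalOrder : Prop := ∀ (cols : Int) (rows : Int) (mode : String), Dom_GetTraversalOrder cols rows mode → Spec_GetTraversalOrder cols rows mode (GetTraversalOrder cols rows mode)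

-- ===== LEMMAS AND PROOFS =====

-- Core combinatorial fact: decoding a flat index over range (R*C) by /C, %C
-- yields exactly the row-by-row enumeration.
theorem pv_flat_eq {α : Type} (R C : Nat) (f : Nat → Nat → α) :
    (List.range (R * C)).map (fun i => f (i / C) (i % C))
      = (List.range R).flatMap (fun r => (List.range C).map (fun c => f r c)) := by
  induction R with
  | zero => simp
  | succ n ih =>
    rw [List.range_succ, Nat.succ_mul, List.range_add]
    simp only [List.map_append, List.map_map, List.flatMap_append, List.flatMap_cons,
      List.flatMap_nil, List.append_nil, ih]
    congr 1
    apply List.map_congr_left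
    intro c hc
    simp only [List.mem_range] at hc
    have hC : 0 < C := by omega
    have h1 : (n * C + c) / C = n := by
      rw [Nat.mul_comm, Nat.mul_add_div hC, Nat.div_eq_of_lt hc, Nat.add_zero]
    have h2 : (n * C + c) % C = c := by
      rw [Nat.mul_comm, Nat.mul_add_mod, Nat.mod_eq_of_lt hc]
    simp [h1, h2]

theorem pv_pyRange0_toNat (n : Int) :
    PySem.List.pyRange 0 n 1 = PySem.List.pyRange 0 ((n.toNat : Int)) 1 := by
  by_cases h : n ≤ 0
  · rw [PySem.List.pyRange_one_eq_nil h, PySem.List.pyRange_one_eq_nil (by omega)]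
  · rw [Int.toNat_of_nonneg (by omega)]

-- Lifting pv_flat_eq to Int pyRanges and PySem arithmetic.
theorem pv_decode (R C : Nat) (f : Int → Int → Int × Int) :
    (PySem.List.pyRange 0 ((R : Int) * (C : Int)) 1).map
        (fun i => f (PySem.Int.floordiv i (C : Int)) (PySem.Int.mod i (C : Int)))
      = (PySem.List.pyRange 0 (R : Int) 1).flatMap
          (fun r => (PySem.List.pyRange 0 (C : Int) 1).map (fun c => f r c)) := by
  rw [PySem.List.pyRange_one 0 ((R : Int) * (C : Int)), PySem.List.pyRange_one 0 (R : Int),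
    PySem.List.pyRange_one 0 (C : Int)]
  have h1 : (((R : Int) * (C : Int)) - 0).toNat = R * C := by
    rw [Int.sub_zero, ← Int.natCast_mul, Int.toNat_natCast]
  have h2 : (((R : Int)) - 0).toNat = R := by omega
  have h3 : (((C : Int)) - 0).toNat = C := by omega
  rw [h1, h2, h3]
  simp only [List.map_map, List.flatMap_map, Function.comp_def, Int.zero_add,
    PySem.Int.floordiv_natCast, PySem.Int.mod_natCast]
  exact pv_flat_eq R C (fun a b => f (a : Int) (b : Int))

-- The serpentine inner body: a forward or backward inner scan equals one forward
-- scan with the offset flipped on the backward case (g builds the emitted pair).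
theorem pv_row_eq (n : Int) (b : Bool) (g : Int → Int × Int) :
    (if b then (PySem.List.pyRange 0 n 1).map g
      else (PySem.List.pyRange (n - 1) (-1) (-1)).map g)
    = (PySem.List.pyRange 0 ((n.toNat : Int)) 1).map
        (fun c => g (if b then c else (n.toNat : Int) - 1 - c)) := by
  cases b with
  | true =>
    rw [pv_pyRange0_toNat]
    simp
  | false =>
    simp only [Bool.false_eq_true, if_false]
    rw [PySem.List.pyRange_neg_one, PySem.List.pyRange_one]
    have h1 : (n - 1 - (-1)).toNat = n.toNat := by omega
    have h2 : (((n.toNat : Int)) - 0).toNat = n.toNat := by omega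
    rw [h1, h2]
    simp only [List.map_map, Function.comp_def, Int.zero_add]
    apply List.map_congr_left
    intro k hk
    simp only [List.mem_range] at hk
    have hn : ((n.toNat : Int)) = n := by omega
    rw [hn]

-- A-side loop shape: accumulate-append nested loops are a flatMap.
theorem pv_foldl_shape (rows : Int) (g : Int → List (Int × Int)) :
    (PySem.List.pyRange 0 rows 1).foldl (fun acc r => acc ++ g r) []
      = (PySem.List.pyRange 0 rows 1).flatMap g := by
  rw [PySem.List.foldl_append_eq_flatMap]
  simp

theorem pv_ifpos (n : Int) : (if n > 0 then n else 0) = ((n.toNat : Int)) := by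
  split_ifs <;> omega

-- Mode lemma: plain row-major double loop = flat decode by cols.
theorem pv_rowmajor (cols rows : Int) :
    (PySem.List.pyRange 0 rows 1).foldl (fun order r =>
        (PySem.List.pyRange 0 cols 1).foldl (fun o c => o ++ [(r, c)]) order) []
    = (PySem.List.pyRange 0 (((rows.toNat : Int)) * ((cols.toNat : Int))) 1).map
        (fun i => (PySem.Int.floordiv i ((cols.toNat : Int)),
                   PySem.Int.mod i ((cols.toNat : Int)))) := by
  have hA : (PySem.List.pyRange 0 rows 1).foldl (fun order r =>
        (PySem.List.pyRange 0 cols 1).foldl (fun o c => o ++ [(r, c)]) order) []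
      = (PySem.List.pyRange 0 rows 1).foldl (fun acc r =>
          acc ++ (PySem.List.pyRange 0 ((cols.toNat : Int)) 1).map (fun c => (r, c))) [] := by
    apply PySem.List.foldl_congr_mem'
    intro r _ acc
    rw [PySem.List.foldl_append_singleton_eq_map, pv_pyRange0_toNat cols]
  rw [hA, pv_foldl_shape, pv_decode rows.toNat cols.toNat (fun r c => (r, c)),
    pv_pyRange0_toNat rows]

-- Mode lemma: column-major double loop = flat decode by rows.
theorem pv_colmajor (cols rows : Int) :
    (PySem.List.pyRange 0 cols 1).foldl (fun order c =>
        (PySem.List.pyRange 0 rows 1).foldl (fun o r => o ++ [(r, c)]) order) []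
    = (PySem.List.pyRange 0 (((rows.toNat : Int)) * ((cols.toNat : Int))) 1).map
        (fun i => (PySem.Int.mod i ((rows.toNat : Int)),
                   PySem.Int.floordiv i ((rows.toNat : Int)))) := by
  have hA : (PySem.List.pyRange 0 cols 1).foldl (fun order c =>
        (PySem.List.pyRange 0 rows 1).foldl (fun o r => o ++ [(r, c)]) order) []
      = (PySem.List.pyRange 0 cols 1).foldl (fun acc c =>
          acc ++ (PySem.List.pyRange 0 ((rows.toNat : Int)) 1).map (fun r => (r, c))) [] := by
    apply PySem.List.foldl_congr_mem'
    intro c _ acc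
    rw [PySem.List.foldl_append_singleton_eq_map, pv_pyRange0_toNat rows]
  have hm : (((rows.toNat : Int)) * ((cols.toNat : Int))) = (((cols.toNat : Int)) * ((rows.toNat : Int))) := by ring
  rw [hA, pv_foldl_shape, hm, pv_decode cols.toNat rows.toNat (fun c r => (r, c)),
    pv_pyRange0_toNat cols]

-- Mode lemma: horizontal serpentine.
theorem pv_horiz (cols rows : Int) :
    (PySem.List.pyRange 0 rows 1).foldl (fun order r =>
        if PySem.Int.mod r 2 == 0 then
          (PySem.List.pyRange 0 cols 1).foldl (fun o c => o ++ [(r, c)]) order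
        else
          (PySem.List.pyRange (cols - 1) (-1) (-1)).foldl (fun o c => o ++ [(r, c)]) order) []
    = (PySem.List.pyRange 0 (((rows.toNat : Int)) * ((cols.toNat : Int))) 1).map
        (fun i =>
          (PySem.Int.floordiv i ((cols.toNat : Int)),
           if PySem.Int.mod (PySem.Int.floordiv i ((cols.toNat : Int))) 2 == 0 then
             PySem.Int.mod i ((cols.toNat : Int))
           else ((cols.toNat : Int)) - 1 - PySem.Int.mod i ((cols.toNat : Int)))) := by
  have hA : (PySem.List.pyRange 0 rows 1).foldl (fun order r =>
        if PySem.Int.mod r 2 == 0 then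
          (PySem.List.pyRange 0 cols 1).foldl (fun o c => o ++ [(r, c)]) order
        else
          (PySem.List.pyRange (cols - 1) (-1) (-1)).foldl (fun o c => o ++ [(r, c)]) order) []
      = (PySem.List.pyRange 0 rows 1).foldl (fun acc r =>
          acc ++ (PySem.List.pyRange 0 ((cols.toNat : Int)) 1).map
            (fun c => (r, if PySem.Int.mod r 2 == 0 then c else ((cols.toNat : Int)) - 1 - c))) [] := by
    apply PySem.List.foldl_congr_mem'
    intro r _ acc
    have hrow := pv_row_eq cols (PySem.Int.mod r 2 == 0) (fun c => (r, c))
    by_cases ht : (PySem.Int.mod r 2 == 0) = true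
    · simp only [ht, reduceIte] at hrow ⊢
      rw [PySem.List.foldl_append_singleton_eq_map, hrow]
    · simp only [eq_false_of_ne_true ht, Bool.false_eq_true, if_false] at hrow ⊢
      rw [PySem.List.foldl_append_singleton_eq_map, hrow]
  rw [hA, pv_foldl_shape,
    pv_decode rows.toNat cols.toNat
      (fun r c => (r, if PySem.Int.mod r 2 == 0 then c else ((cols.toNat : Int)) - 1 - c)),
    pv_pyRange0_toNat rows]

-- Mode lemma: vertical serpentine.
theorem pv_vert (cols rows : Int) :
    (PySem.List.pyRange 0 cols 1).foldl (fun order c =>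
        if PySem.Int.mod c 2 == 0 then
          (PySem.List.pyRange 0 rows 1).foldl (fun o r => o ++ [(r, c)]) order
        else
          (PySem.List.pyRange (rows - 1) (-1) (-1)).foldl (fun o r => o ++ [(r, c)]) order) []
    = (PySem.List.pyRange 0 (((rows.toNat : Int)) * ((cols.toNat : Int))) 1).map
        (fun i =>
          ((if PySem.Int.mod (PySem.Int.floordiv i ((rows.toNat : Int))) 2 == 0 then
              PySem.Int.mod i ((rows.toNat : Int))
            else ((rows.toNat : Int)) - 1 - PySem.Int.mod i ((rows.toNat : Int))),
           PySem.Int.floordiv i ((rows.toNat : Int)))) := by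
  have hA : (PySem.List.pyRange 0 cols 1).foldl (fun order c =>
        if PySem.Int.mod c 2 == 0 then
          (PySem.List.pyRange 0 rows 1).foldl (fun o r => o ++ [(r, c)]) order
        else
          (PySem.List.pyRange (rows - 1) (-1) (-1)).foldl (fun o r => o ++ [(r, c)]) order) []
      = (PySem.List.pyRange 0 cols 1).foldl (fun acc c =>
          acc ++ (PySem.List.pyRange 0 ((rows.toNat : Int)) 1).map
            (fun r => ((if PySem.Int.mod c 2 == 0 then r else ((rows.toNat : Int)) - 1 - r), c))) [] := by
    apply PySem.List.foldl_congr_mem'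
    intro c _ acc
    have hrow := pv_row_eq rows (PySem.Int.mod c 2 == 0) (fun r => (r, c))
    by_cases ht : (PySem.Int.mod c 2 == 0) = true
    · simp only [ht, reduceIte] at hrow ⊢
      rw [PySem.List.foldl_append_singleton_eq_map, hrow]
    · simp only [eq_false_of_ne_true ht, Bool.false_eq_true, if_false] at hrow ⊢
      rw [PySem.List.foldl_append_singleton_eq_map, hrow]
  have hm : (((rows.toNat : Int)) * ((cols.toNat : Int))) = (((cols.toNat : Int)) * ((rows.toNat : Int))) := by ring
  rw [hA, pv_foldl_shape, hm,
    pv_decode cols.toNat rows.toNat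
      (fun c r => ((if PySem.Int.mod c 2 == 0 then r else ((rows.toNat : Int)) - 1 - r), c)),
    pv_pyRange0_toNat cols]

-- ===== VERDICT (by name: the statement is the Claim_ definition above) =====
theorem GetTraversalOrder_spec : Claim_equal_GetTraversalOrder := by
  intro cols rows mode _
  show GetTraversalOrder cols rows mode = GetTraversalOrder_alt cols rows mode
  simp only [GetTraversalOrder, GetTraversalOrder_alt, pv_ifpos]
  by_cases h1 : PySem.Str.strip mode = "Horizontal Serpentine"
  · simp only [h1, beq_self_eq_true, if_true]
    exact pv_horiz cols rows
  by_cases h2 : PySem.Str.strip mode = "Vertical Serpentine"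
  · simp only [h2, show (("Vertical Serpentine" : String) == "Horizontal Serpentine") = false by decide,
      beq_self_eq_true, if_true]
    exact pv_vert cols rows
  by_cases h3 : PySem.Str.strip mode = "Row-Major"
  · simp only [h3, show (("Row-Major" : String) == "Horizontal Serpentine") = false by decide,
      show (("Row-Major" : String) == "Vertical Serpentine") = false by decide,
      show (("Row-Major" : String) == "Column-Major") = false by decide,
      beq_self_eq_true, if_true]
    exact pv_rowmajor cols rows
  by_cases h4 : PySem.Str.strip mode = "Column-Major"
  · simp only [h4, show (("Column-Major" : String) == "Horizontal Serpentine") = false by decide,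
      show (("Column-Major" : String) == "Vertical Serpentine") = false by decide,
      show (("Column-Major" : String) == "Row-Major") = false by decide,
      beq_self_eq_true, if_true]
    exact pv_colmajor cols rows
  · simp only [beq_eq_false_iff_ne.mpr h1, beq_eq_false_iff_ne.mpr h2,
      beq_eq_false_iff_ne.mpr h3, beq_eq_false_iff_ne.mpr h4]
    exact pv_rowmajor cols rows
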